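/- GENERATED by tools/from_farm_form.py from prooffarm-gif/accepted/DGifBufferedInput.3/Lemmas.lean (a worked proof of the farm's unit `DGifBufferedInput.3`,
   accepted by the verdict) — do not edit. -/
import Gif.Spec.Units.DGifBufferedInput_3
import Gif.Spec.AllSegs

/-!
  Lemmas for the unit `DGifBufferedInput.3` (a body segment of a function WITHOUT a protected frame: a reader call into `pv.Buf`,
  then checked loads / stores of `pv.Buf`, `*NextByte`, `gif.Error`): the segment is walked in TWO STEPS that meet at the call's
  return address 0x10660d (`ret9`), with a private assertion there.

      bi3_env_at_call  `Env` at a callee's entry from the body's `HeapInv` / `GifOK` (`Env.at_call` without an own frame)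
      bi3_step         `HeapInv ∧ GifOK ∧ rem` through a footprint of loose heap windows
      bi3_movzx8_reg   `movzx edx, dl` of a register that holds a byte value
      bi3_eq_of_cmp    the branch fact of `cmp r14d, eax ; je` at 0x10661e: the count equals `Buf[0]`
      bi3_dec_byte     the byte stored by `Buf[0] = Buf[0] − 1` is `n − 1`
      bi3_AtRet9       the assertion at `ret9`: `Body` + what is live THERE
      bi3_seg_call     0x1065fe … the call of InternalRead … 0x10660d: `AfterLen` → `bi3_AtRet9`
      bi3_seg_tail     0x10660d … 0x10659d (both arms): `bi3_AtRet9` → `Done`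
-/

open X86 X86.User Asan ProgX.Base ProgX.Base.Spec Gif.Spec

set_option maxRecDepth 4000
set_option maxHeartbeats 4000000

namespace Gif.Spec.DGifBufferedInput_3

/-- **`Env` AT THE ENTRY OF A CALLEE of a function without a protected frame** (`Env.at_call` of Gif/Spec/FrameCarry.lean for the
frame list `frames` itself): `henv` is the ENTRY's environment, `hinv` / `hok` the body's invariants at a memory `mem`
(`Frame.inv`, `Frame.ok`: `top` = the body's stack pointer), and the callee's entry state `s` differs from `mem` by stack stores
below `top` (the pushed return address). -/
theorem bi3_env_at_call {H : Heap} {rest : List Obj} {frames : List (Nat × FrameLayout)} {F : Forest} {R : Rd} {e s : State}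
    {top lo : Nat} {mem : Mem} (henv : Env H rest frames F R e)
    (hinv : HeapInv H rest frames top mem) (hok : GifOK H F R mem)
    (hs : Mem.SameExcept [⟨lo, top⟩] mem s.mem) (hlo : 0x700000 ≤ lo) (htop : top ≤ (e.reg .rsp).toNat + 8)
    (hsp : (s.reg .rsp).toNat + 8 ≤ top) (h8 : (s.reg .rsp).toNat % 8 = 0) (hlo' : 0x700000 ≤ (s.reg .rsp).toNat + 8) :
    Env H rest frames F R s := by
  have hcur := henv.ctx.cursor_range henv.heap.inv.shadow
  have hhi := hinv.shadow.stack.hi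
  have hoff := hinv.heap.offStack
  have hroom := hinv.heap.room
  have hun : ShadowUntouched mem s.mem := by
    apply hs.eqOn
    intro w hw
    have e := List.mem_singleton.mp hw
    rw [e]
    simp only
    omega
  have hinv' : HeapInv H rest frames ((s.reg .rsp).toNat + 8) s.mem := by
    refine (hinv.sameExcept hun hs ?_).lower hsp (by omega) hlo'
    intro w hw
    have e := List.mem_singleton.mp hw
    rw [e]
    left
    simp only
    omega
  refine ⟨⟨hinv', henv.heap.base, henv.heap.limit, henv.heap.text, henv.heap.offText⟩, henv.ctx, ?_⟩
  apply hok.sameExcept hinv.heap ⟨hcur.1, hcur.2.1⟩ hs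
  intro w hw
  have e := List.mem_singleton.mp hw
  rw [e]
  apply Loose.stack hinv.heap
  · simp only
    omega
  · simp only
    omega
  · simp only
    omega

/-- **The three invariants of `Frame` through a footprint of loose heap windows** (no shadow byte written): the heap's invariant,
the state invariant, and the reader's measure. Used once per exit of the tail segment, for ALL its stores together. -/
theorem bi3_step {H : Heap} {rest : List Obj} {frames : List (Nat × FrameLayout)} {F : Forest} {R : Rd} {top : Nat}
    {mem mem' : Mem} {ws : List Span} (hinv : HeapInv H rest frames top mem) (hok : GifOK H F R mem)
    (hcur : 0x700000 ≤ R.cur ∧ R.cur + 16 ≤ 0x800000) (hun : ShadowUntouched mem mem') (hs : Mem.SameExcept ws mem mem')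
    (hl : ∀ w, w ∈ ws → Loose H F R w) (hw : ∀ w, w ∈ ws → HeapWin H w) :
    HeapInv H rest frames top mem' ∧ GifOK H F R mem' ∧ rem R mem' = rem R mem := by
  refine ⟨hinv.sameExcept hun hs hw, hok.sameExcept hinv.heap hcur hs hl, ?_⟩
  exact rem_loose hs hl hinv.heap (hok.owns.placed hinv.heap) hcur

/-- `movzx edx, dl` (register to register) of a register that holds a byte value: the whole of the register is that value. -/
theorem bi3_movzx8_reg (x : Word) (h : x.toNat < 256) :
    (Word.ofBV (BitVec.zeroExtend 32 (Word.part .w8 x))).toNat = x.toNat := by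
  unfold Word.ofBV Word.part
  simp only [UInt64.toNat_ofBitVec, Width.bits, BitVec.toNat_setWidth, UInt64.toNat_toBitVec, BitVec.truncate_eq_setWidth]
  omega

/-- **At 10660DH (ret9), `InternalRead(gif, Buf + 1, Buf[0])` has returned**: `Body`, `Buf[0]` is still the length `1 … 255`, `rbp`
is still 1, `eax = k ≤ Buf[0]` the bytes delivered, and `k = Buf[0]` means the reader advanced by `1 + Buf[0]` since the entry. -/
structure bi3_AtRet9 (H : Heap) (rest : List Obj) (frames : List (Nat × FrameLayout)) (F : Forest) (R : Rd) (u₀ e : State)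
    (ret : Word) (v : State) : Prop where
  body : DGifBufferedInput.Body Gif.L.DGifBufferedInput.ret9 H rest frames F R u₀ e ret v
  len_pos : 1 ≤ rd v.mem (F.pv + 88) 1
  len_le : rd v.mem (F.pv + 88) 1 ≤ 255
  rbp : (v.reg .rbp).toNat = 1
  count : (v.reg .rax).toNat ≤ rd v.mem (F.pv + 88) 1
  adv : (v.reg .rax).toNat = rd v.mem (F.pv + 88) 1 → rem R v.mem + rd v.mem (F.pv + 88) 1 + 1 = rem R e.mem

/-- **1065FEH … the call of InternalRead … 10660DH (ret9)** (dgif_lib.c:1135 `InternalRead(GifFile, &Buf[1], Buf[0])`).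
`edx = Buf[0]` (zero-extended from `dl`), `rsi = Buf + 1`, `rdi = r13 = gif`. -/
theorem bi3_seg_call (Lay : Layout) (hLay : Lay.hi = 0x1000000) (μ : Microarch) (hμ : UserX.MicroOK μ) (u₀ : State)
    (hcode : HasCodeNat Lay u₀ Gif.L.DGifBufferedInput.entry Gif.Code.code_DGifBufferedInput.nat Gif.L.DGifBufferedInput.size)
    (H : Heap) (rest : List Obj) (frames : List (Nat × FrameLayout)) (F : Forest) (R : Rd) (e : State) (ret : Word)
    (v : State)
    (h_InternalRead : Calls Lay μ ProgX.Base.WayInv (ProgX.Base.conv u₀) Gif.L.InternalRead.entry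
      (Gif.Spec.InternalRead.spec H rest frames F R (rd v.mem (F.pv + 88) 1)))
    (hat : DGifBufferedInput.AfterLen H rest frames F R u₀ e ret v) :
    ReachVia Lay μ ProgX.Base.WayInv v (bi3_AtRet9 H rest frames F R u₀ e ret) := by
  -- THE PRELUDE: the entry assertion `AfterLen` = `Body` + `rdx = Buf[0]`, `1 ≤ Buf[0] ≤ 255`, `rbp = 1`, one byte read
  obtain ⟨hbodyB, hrdx, hlen1, hlen2, hrbp, hrem_eq⟩ := hat
  obtain ⟨hbody, c_r13, c_rbx, c_r12⟩ := hbodyB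
  have he := hbody.entry
  v_entry he
  obtain ⟨henv, hrdi, hrsi, hout⟩ := hbody.pre
  -- what the walker reads of a segment's entry state: rip, rsp (as `c_rsp`), the registers kept, the text, DF / MXCSR
  have w_rip := hbody.rip
  have c_rsp : v.reg .rsp = e.reg .rsp - 40 := hbody.rsp
  obtain ⟨d, c_rdx⟩ : ∃ d, v.reg .rdx = d := ⟨_, rfl⟩
  rw [c_rdx] at hrdx
  have w_kept : RegsKept [.rsp] v v := RegsKept.refl _ _
  have w_eq : Mem.EqOn ProgX.Base.L.textLo ProgX.Base.L.textHi u₀.mem v.mem := ProgX.Base.conv_code_eqOn hbody.code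
  have hdf := (show abiInv _ from hbody.abi).1
  have hmx := (show abiInv _ from hbody.abi).2
  have hsse := ProgX.Base.sseOK_of_abiInv hbody.abi
  -- the slots and the footprint that `Frame` at the exit states again
  have k_r14 : v.mem.readLE (e.reg .rsp - 8) 8 = (e.reg .r14).toNat := hbody.slot_r14
  have k_r13 : v.mem.readLE (e.reg .rsp - 16) 8 = (e.reg .r13).toNat := hbody.slot_r13
  have k_r12 : v.mem.readLE (e.reg .rsp - 24) 8 = (e.reg .r12).toNat := hbody.slot_r12
  have k_rbp : v.mem.readLE (e.reg .rsp - 32) 8 = (e.reg .rbp).toNat := hbody.slot_rbp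
  have k_rbx : v.mem.readLE (e.reg .rsp - 40) 8 = (e.reg .rbx).toNat := hbody.slot_rbx
  have k_ra : UInt64.ofNat (v.mem.readLE (e.reg .rsp) 8) = ret := hbody.slot_ra
  have hsame : Mem.SameExcept
    [⟨(e.reg .rsp).toNat - 224, (e.reg .rsp).toNat⟩,
     ⟨F.pv + 88, F.pv + 344⟩,
     ⟨(e.reg .rdx).toNat, (e.reg .rdx).toNat + 1⟩,
     ⟨F.gif + 96, F.gif + 100⟩,
     ⟨R.cur, R.cur + 8⟩] e.mem v.mem := hbody.same
  have habove := hbody.next_above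
  -- where the cursor, gif and pv are, as numbers (`v_side`, `u_same`, `u_omega` place every store with them)
  have hcur := henv.ctx.cursor_range henv.heap.inv.shadow
  have hbase := henv.heap.base
  have hgin := (henv.ok.owns.inside henv.heap.inv.heap (o := (F.gif, 120)) List.mem_cons_self)
  have hpin := (henv.ok.owns.inside henv.heap.inv.heap (o := (F.pv, 24936)) (List.mem_cons_of_mem _ List.mem_cons_self))
  simp only at hgin hpin
  rw [hbase] at hgin hpin
  have hg1 := hgin.1
  have hg2 := hgin.2.1
  have hp1 := hpin.1
  have hp2 := hpin.2.1
  clear hgin hpin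
  have hroom := henv.heap.inv.heap.room
  have hlimit := henv.heap.limit
  rw [hbase, hlimit] at hroom
  -- THE WALK, to the call's return address
  u_walk hcode [hμ.vendor] until [Gif.L.DGifBufferedInput.ret9] span [ProgX.Base.L.textLo, ProgX.Base.L.textHi] side (v_side)
  case call_inv =>
    v_inv
  case pre_106608 =>
    -- INTERNALREAD'S PRECONDITION. The environment: only the return address was pushed since `v`
    have hs : Mem.SameExcept [⟨(e.reg .rsp).toNat - 224, (e.reg .rsp).toNat - 40⟩] v.mem s_106608.mem := by
      rw [w_mem]
      u_same
    have henv' : Env H rest frames F R s_106608 := by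
      refine bi3_env_at_call henv hbody.inv hbody.ok hs (by omega) (by omega) ?_ ?_ ?_
      · rw [w_rsp]
        u_omega
      · rw [w_rsp]
        u_omega
      · rw [w_rsp]
        u_omega
    -- the buffer is `Buf[1 … 1 + Buf[0])`, inside `pv.Buf[256]` (`1 + 255 ≤ 256`)
    have e_rsi : (s_106608.reg .rsi).toNat = F.pv + 88 + 1 := by
      rw [w_rsi]
      u_omega
    have hbuf : BufOK H rest frames F R (s_106608.reg .rsi).toNat (rd v.mem (F.pv + 88) 1) := by
      rw [e_rsi]
      refine ⟨?_, ?_, ?_, by omega⟩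
      · exact bufLive hbody.ok.pv_live rest frames 1 (rd v.mem (F.pv + 88) 1) (by omega)
      · apply Loose.pvBody
        right
        simp only
        omega
      · apply HeapWin.pv hbody.inv.heap hbody.ok.owns
        · simp only
          omega
        · simp only
          omega
    -- the six clauses: `Env`, `rdi = gif`, `edx = Buf[0]`, `1 ≤ Buf[0]`, `Buf[0] < 2 ^ 31`, `BufOK`
    refine ⟨henv', ?_, ?_, hlen1, by omega, hbuf⟩
    · rw [w_rdi]
      exact hrdi
    · rw [w_rdx, bi3_movzx8_reg d (by omega), hrdx]
      omega
  -- 0x10660d (ret9): INTERNALREAD HAS RETURNED. Its post: `k` bytes delivered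
  obtain ⟨k, hk1, hk2, hk3, hk4, hk5, hback⟩ :
    ReadPost H rest frames F R (rd v.mem (F.pv + 88) 1) s_106608 s_106608r := w_post
  -- the reader at InternalRead's entry is where it was at `v`: only the return address was pushed
  have hs0 : Mem.SameExcept [⟨(e.reg .rsp).toNat - 224, (e.reg .rsp).toNat - 40⟩] v.mem s_106608.mem := by
    rw [w_mem_106608]
    u_same
  have hrem0 : rem R s_106608.mem = rem R v.mem := by
    apply rem_sameExcept hs0 (by omega)
    intro w hw
    have e := List.mem_singleton.mp hw
    rw [e]
    simp only
    omega
  have e_top : (s_106608.reg .rsp).toNat + 8 = (e.reg .rsp).toNat - 40 := by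
    rw [w_rsp_106608]
    u_omega
  -- the callee's footprint in terms of `v` (`w_same : SameExcept […] v.mem s_106608r.mem`)
  v_after_call w_rsp_106608 w_mem_106608
  simp only [w_rsi_106608] at w_same
  -- THE SLOTS, THE RETURN ADDRESS AND `Buf[0]`, over the pushed return address (first step) and through InternalRead's footprint
  -- (second step: `Buf[1 …]`, the cursor, the stack below)
  have hp_r14 : s_106608.mem.readLE (e.reg .rsp - 8) 8 = (e.reg .r14).toNat := by
    rw [w_mem_106608]
    u_frame k_r14
  rw [w_mem_106608] at hp_r14
  have hs_r14 : s_106608r.mem.readLE (e.reg .rsp - 8) 8 = (e.reg .r14).toNat := by u_frame hp_r14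
  have hp_r13 : s_106608.mem.readLE (e.reg .rsp - 16) 8 = (e.reg .r13).toNat := by
    rw [w_mem_106608]
    u_frame k_r13
  rw [w_mem_106608] at hp_r13
  have hs_r13 : s_106608r.mem.readLE (e.reg .rsp - 16) 8 = (e.reg .r13).toNat := by u_frame hp_r13
  have hp_r12 : s_106608.mem.readLE (e.reg .rsp - 24) 8 = (e.reg .r12).toNat := by
    rw [w_mem_106608]
    u_frame k_r12
  rw [w_mem_106608] at hp_r12
  have hs_r12 : s_106608r.mem.readLE (e.reg .rsp - 24) 8 = (e.reg .r12).toNat := by u_frame hp_r12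
  have hp_rbp : s_106608.mem.readLE (e.reg .rsp - 32) 8 = (e.reg .rbp).toNat := by
    rw [w_mem_106608]
    u_frame k_rbp
  rw [w_mem_106608] at hp_rbp
  have hs_rbp : s_106608r.mem.readLE (e.reg .rsp - 32) 8 = (e.reg .rbp).toNat := by u_frame hp_rbp
  have hp_rbx : s_106608.mem.readLE (e.reg .rsp - 40) 8 = (e.reg .rbx).toNat := by
    rw [w_mem_106608]
    u_frame k_rbx
  rw [w_mem_106608] at hp_rbx
  have hs_rbx : s_106608r.mem.readLE (e.reg .rsp - 40) 8 = (e.reg .rbx).toNat := by u_frame hp_rbx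
  have hp_ra : UInt64.ofNat (s_106608.mem.readLE (e.reg .rsp) 8) = ret := by
    rw [w_mem_106608]
    u_frame k_ra
  rw [w_mem_106608] at hp_ra
  have hs_ra : UInt64.ofNat (s_106608r.mem.readLE (e.reg .rsp) 8) = ret := by u_frame hp_ra
  have hb0 : v.mem.readLE (e.reg .rsi) 1 = rd v.mem (F.pv + 88) 1 := rd_eq_readLE v.mem (e.reg .rsi) (F.pv + 88) 1 hrsi
  have hp_b0 : s_106608.mem.readLE (e.reg .rsi) 1 = rd v.mem (F.pv + 88) 1 := by
    rw [w_mem_106608]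
    u_frame hb0
  rw [w_mem_106608] at hp_b0
  have hs_b0 : s_106608r.mem.readLE (e.reg .rsi) 1 = rd v.mem (F.pv + 88) 1 := by u_frame hp_b0
  have hlen : rd s_106608r.mem (F.pv + 88) 1 = rd v.mem (F.pv + 88) 1 := by
    rw [← rd_eq_readLE s_106608r.mem (e.reg .rsi) (F.pv + 88) 1 hrsi]
    exact hs_b0
  -- the footprint since the entry: InternalRead's windows lie inside the function's
  have hsame1 : Mem.SameExcept
    [⟨(e.reg .rsp).toNat - 224, (e.reg .rsp).toNat⟩,
     ⟨F.pv + 88, F.pv + 344⟩,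
     ⟨(e.reg .rdx).toNat, (e.reg .rdx).toNat + 1⟩,
     ⟨F.gif + 96, F.gif + 100⟩,
     ⟨R.cur, R.cur + 8⟩] e.mem s_106608r.mem := by u_same
  -- the heap's invariant comes back with the clean stack at the callee's `rsp + 8` = the body's `rsp`
  have hinv1 : HeapInv H rest frames ((e.reg .rsp).toNat - 40) s_106608r.mem := by
    rw [← e_top]
    exact hback.inv
  -- THE EXIT ASSERTION: `Frame` at `ret9` …
  have hframe1 : DGifBufferedInput.Frame Gif.L.DGifBufferedInput.ret9 H rest frames F R u₀ e ret s_106608r := {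
    entry := hbody.entry
    pre := hbody.pre
    next_above := hbody.next_above
    rip := w_rip
    rsp := w_rsp
    r15 := (w_kept.get .r15 rfl).trans hbody.r15
    slot_r14 := hs_r14
    slot_r13 := hs_r13
    slot_r12 := hs_r12
    slot_rbp := hs_rbp
    slot_rbx := hs_rbx
    slot_ra := hs_ra
    inv := hinv1
    ok := hback.ok
    rem := by
      have h1 := hback.rem
      have h2 := hbody.rem
      omega
    same := hsame1
    code := w_code
    abi := w_inv
  }
  -- … the three arguments still in their registers, and what is live at `ret9`
  refine ReachVia.done ?_
  exact {
    body := ⟨hframe1, (w_kept.get .r13 rfl).trans c_r13, (w_kept.get .rbx rfl).trans c_rbx, (w_kept.get .r12 rfl).trans c_r12⟩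
    len_pos := by
      rw [hlen]
      exact hlen1
    len_le := by
      rw [hlen]
      exact hlen2
    rbp := by
      rw [w_kept.get .rbp rfl]
      exact hrbp
    count := by
      rw [hlen, hk4]
      exact hk1
    adv := by
      intro heq
      rw [hlen, hk4] at heq
      rw [hlen, hk5]
      omega
  }

/-- The branch fact of `cmp r14d, eax ; je` at 10661EH (`r14d` = the count `z ≤ n`, `eax` = the byte `n = Buf[0]`): they are equal. -/
theorem bi3_eq_of_cmp (z : Word) (n : Nat) (hz : z.toNat ≤ n) (hn : n ≤ 255)
    (h : (Word.part Width.w32 z).toNat = (BitVec.zeroExtend 32 (BitVec.ofNat 8 n)).toNat) : z.toNat = n := by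
  rw [toNat_part32] at h
  simp only [BitVec.toNat_setWidth, BitVec.truncate_eq_setWidth, BitVec.toNat_ofNat] at h
  omega

/-- `movzx eax, byte [rbx] ; sub eax, 1 ; mov [rbx], al` for a byte `1 ≤ n ≤ 255`: the byte stored is `n − 1`. -/
theorem bi3_dec_byte (n : Nat) (h1 : 1 ≤ n) (h2 : n ≤ 255) :
    (BitVec.setWidth 8 (BitVec.zeroExtend 32 (BitVec.ofNat 8 n) - 1#32)).toNat = n - 1 := by
  simp only [BitVec.toNat_setWidth, BitVec.truncate_eq_setWidth, BitVec.toNat_ofNat, BitVec.toNat_sub]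
  omega

/-- **10660DH (ret9) … 10659DH** (dgif_lib.c:1135-1141): `r14d = eax`; the checked re-load of `Buf[0]`; different: the checked store
of `gif.Error = 102`, `ebp = 0`; equal: the checked load of `Buf[1]`, the checked store of `*NextByte`, `Buf[1] = 2`,
`Buf[0] = Buf[0] − 1`, `ebp` still 1. Both arms end before the epilogue. -/
theorem bi3_seg_tail (Lay : Layout) (hLay : Lay.hi = 0x1000000) (μ : Microarch) (hμ : UserX.MicroOK μ) (u₀ : State)
    (hcode : HasCodeNat Lay u₀ Gif.L.DGifBufferedInput.entry Gif.Code.code_DGifBufferedInput.nat Gif.L.DGifBufferedInput.size)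
    (H : Heap) (rest : List Obj) (frames : List (Nat × FrameLayout)) (F : Forest) (R : Rd) (e : State) (ret : Word)
    (h_asan_load1_noabort : Asan.SmallCheck Lay μ ProgX.Base.WayInv (ProgX.Base.CodeOK u₀) [.rax, .rdx] 1
      ProgX.Base.L.__asan_load1_noabort.entry)
    (h_asan_store1_noabort : Asan.SmallCheck Lay μ ProgX.Base.WayInv (ProgX.Base.CodeOK u₀) [.rax, .rdx] 1
      ProgX.Base.L.__asan_store1_noabort.entry)
    (h_asan_store4_noabort : Asan.SmallCheck Lay μ ProgX.Base.WayInv (ProgX.Base.CodeOK u₀) [.rax, .rcx, .rdx] 4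
      ProgX.Base.L.__asan_store4_noabort.entry)
    (v : State) (hat : bi3_AtRet9 H rest frames F R u₀ e ret v) :
    ReachVia Lay μ ProgX.Base.WayInv v (DGifBufferedInput.Done H rest frames F R u₀ e ret) := by
  -- THE PRELUDE: the entry assertion, as in `bi3_seg_call`
  obtain ⟨hbodyB, hlen1, hlen2, hrbp, hcount, hadv⟩ := hat
  obtain ⟨hbody, c_r13, c_rbx, c_r12⟩ := hbodyB
  have he := hbody.entry
  v_entry he
  obtain ⟨henv, hrdi, hrsi, hout⟩ := hbody.pre
  have w_rip := hbody.rip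
  have c_rsp : v.reg .rsp = e.reg .rsp - 40 := hbody.rsp
  -- `eax` as a variable `z` (the branch fact of `cmp r14d, eax` speaks of it), the length `Buf[0]` as a number `n`
  obtain ⟨z, c_rax⟩ : ∃ z, v.reg .rax = z := ⟨_, rfl⟩
  obtain ⟨y, c_rbp⟩ : ∃ y, v.reg .rbp = y := ⟨_, rfl⟩
  obtain ⟨n, hn⟩ : ∃ n, n = rd v.mem (F.pv + 88) 1 := ⟨_, rfl⟩
  rw [c_rax, ← hn] at hcount hadv
  rw [c_rbp] at hrbp
  rw [← hn] at hlen1 hlen2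
  have l_b0 : v.mem.readLE (e.reg .rsi) 1 = n := by
    rw [rd_eq_readLE v.mem (e.reg .rsi) (F.pv + 88) 1 hrsi]
    exact hn.symm
  have w_kept : RegsKept [.rsp] v v := RegsKept.refl _ _
  have w_eq : Mem.EqOn ProgX.Base.L.textLo ProgX.Base.L.textHi u₀.mem v.mem := ProgX.Base.conv_code_eqOn hbody.code
  have hdf := (show abiInv _ from hbody.abi).1
  have hmx := (show abiInv _ from hbody.abi).2
  have hsse := ProgX.Base.sseOK_of_abiInv hbody.abi
  have k_r14 : v.mem.readLE (e.reg .rsp - 8) 8 = (e.reg .r14).toNat := hbody.slot_r14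
  have k_r13 : v.mem.readLE (e.reg .rsp - 16) 8 = (e.reg .r13).toNat := hbody.slot_r13
  have k_r12 : v.mem.readLE (e.reg .rsp - 24) 8 = (e.reg .r12).toNat := hbody.slot_r12
  have k_rbp : v.mem.readLE (e.reg .rsp - 32) 8 = (e.reg .rbp).toNat := hbody.slot_rbp
  have k_rbx : v.mem.readLE (e.reg .rsp - 40) 8 = (e.reg .rbx).toNat := hbody.slot_rbx
  have k_ra : UInt64.ofNat (v.mem.readLE (e.reg .rsp) 8) = ret := hbody.slot_ra
  have hsame : Mem.SameExcept
    [⟨(e.reg .rsp).toNat - 224, (e.reg .rsp).toNat⟩,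
     ⟨F.pv + 88, F.pv + 344⟩,
     ⟨(e.reg .rdx).toNat, (e.reg .rdx).toNat + 1⟩,
     ⟨F.gif + 96, F.gif + 100⟩,
     ⟨R.cur, R.cur + 8⟩] e.mem v.mem := hbody.same
  have habove := hbody.next_above
  have hlow := hout.low
  -- where the cursor, gif and pv are, as numbers
  have hcur := henv.ctx.cursor_range henv.heap.inv.shadow
  have hbase := henv.heap.base
  have hgin := (henv.ok.owns.inside henv.heap.inv.heap (o := (F.gif, 120)) List.mem_cons_self)
  have hpin := (henv.ok.owns.inside henv.heap.inv.heap (o := (F.pv, 24936)) (List.mem_cons_of_mem _ List.mem_cons_self))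
  simp only at hgin hpin
  rw [hbase] at hgin hpin
  have hg1 := hgin.1
  have hg2 := hgin.2.1
  have hp1 := hpin.1
  have hp2 := hpin.2.1
  clear hgin hpin
  have hroom := henv.heap.inv.heap.room
  have hlimit := henv.heap.limit
  rw [hbase, hlimit] at hroom
  -- gif, `pv.Buf[0]`, `pv.Buf[1]` and `*NextByte` are live: what the four check goals ask
  have hgl : LiveIn (H.liveObjs ++ rest) frames F.gif 120 :=
    hbody.ok.gif_live.liveIn rest _ (Nat.le_refl _) (Nat.le_refl _)
  have hbl := bufLive hbody.ok.pv_live rest frames 0 2 (by omega)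
  simp only [gfield] at hbl
  have hnl := hout.buf.live
  -- THE WALK, both arms, to the epilogue's first instruction
  u_walk hcode [hμ.vendor] until [Gif.L.DGifBufferedInput.at_10659d] span [ProgX.Base.L.textLo, ProgX.Base.L.textHi] side (v_side)
  case check_106613 =>
    -- dgif_lib.c:1135 the re-load of `Buf[0]`
    have hun : ShadowUntouched v.mem s_106613.mem := by v_untouched
    exact hbl.accSmall hbody.inv.shadow hun _ 1 (by decide) (by u_omega) (by u_omega)
  case check_10663f =>
    -- dgif_lib.c:1139 the load of `Buf[1]`
    have hun : ShadowUntouched v.mem s_10663f.mem := by v_untouched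
    exact hbl.accSmall hbody.inv.shadow hun _ 1 (by decide) (by u_omega) (by u_omega)
  case check_10664c =>
    -- dgif_lib.c:1139 the store of `*NextByte`
    have hun : ShadowUntouched v.mem s_10664c.mem := by v_untouched
    exact hnl.accSmall hbody.inv.shadow hun _ 1 (by decide) (by u_omega) (by u_omega)
  case check_106624 =>
    -- dgif_lib.c:1136 the store of `gif.Error`
    have hun : ShadowUntouched v.mem s_106624.mem := by v_untouched
    exact hgl.accSmall hbody.inv.shadow hun _ 4 (by decide) (by u_omega) (by u_omega)
  · -- 0x10659d FROM 0x106661: all `Buf[0]` bytes were read; `*NextByte = Buf[1]`, `Buf[1] = 2`, `Buf[0] −= 1`, ebp still 1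
    -- the byte `Buf[1]` as a variable
    obtain ⟨b1, hb1⟩ : ∃ b1 : Nat, b1 = (BitVec.setWidth 8
        (BitVec.zeroExtend 32 (BitVec.ofNat 8 (v.mem.readLE (e.reg .rsi + 1) 1)))).toNat := ⟨_, rfl⟩
    rw [← hb1] at w_mem
    clear hb1 w_r13
    -- the branch fact of `cmp r14d, eax ; je`: `eax = Buf[0]`
    have hz : z.toNat = n := bi3_eq_of_cmp z n hcount hlen2 hbr_10661e
    clear hbr_10661e
    -- the new `Buf[0]`
    have hdec := bi3_dec_byte n hlen1 hlen2
    obtain ⟨b0, hb0⟩ : ∃ b0 : Nat, b0 = (BitVec.setWidth 8 (BitVec.zeroExtend 32 (BitVec.ofNat 8 n) - 1#32)).toNat := ⟨_, rfl⟩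
    rw [← hb0] at w_mem hdec
    have w_flags' := w_flags
    clear hb0 w_rax w_flags
    -- the four stores since `v`: the check calls' return address (stack), `*NextByte`, `Buf[1]`, `Buf[0]`
    have hun : ShadowUntouched v.mem s_106661.mem := by v_untouched
    have hs : Mem.SameExcept
      [⟨(e.reg .rsp).toNat - 224, (e.reg .rsp).toNat - 40⟩,
       ⟨F.pv + 88, F.pv + 344⟩,
       ⟨(e.reg .rdx).toNat, (e.reg .rdx).toNat + 1⟩] v.mem s_106661.mem := by
      rw [w_mem]
      u_same
    obtain ⟨hinvB, hokB, hremF⟩ := bi3_step hbody.inv hbody.ok ⟨hcur.1, hcur.2.1⟩ hun hs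
      (by
        intro w hw
        rcases List.mem_cons.mp hw with e1 | hw
        · rw [e1]
          apply Loose.stack hbody.inv.heap
          · simp only
            omega
          · simp only
            omega
          · simp only
            omega
        rcases List.mem_cons.mp hw with e2 | hw
        · rw [e2]
          apply Loose.pvBody
          right
          simp only
          omega
        have e3 := List.mem_singleton.mp hw
        rw [e3]
        exact hout.buf.loose)
      (by
        intro w hw
        rcases List.mem_cons.mp hw with e1 | hw
        · rw [e1]
          left
          left
          simp only
          omega
        rcases List.mem_cons.mp hw with e2 | hw
        · rw [e2]
          apply HeapWin.pv hbody.inv.heap hbody.ok.owns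
          · simp only
            omega
          · simp only
            omega
        have e3 := List.mem_singleton.mp hw
        rw [e3]
        exact hout.buf.win)
    -- THE EXIT ASSERTION: `Frame` at 0x10659d …
    have hframe1 : DGifBufferedInput.Frame Gif.L.DGifBufferedInput.at_10659d H rest frames F R u₀ e ret s_106661 := {
      entry := hbody.entry
      pre := hbody.pre
      next_above := hbody.next_above
      rip := w_rip
      rsp := w_rsp
      r15 := (w_kept.get .r15 rfl).trans hbody.r15
      slot_r14 := by
        rw [w_mem]
        u_frame k_r14
      slot_r13 := by
        rw [w_mem]
        u_frame k_r13
      slot_r12 := by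
        rw [w_mem]
        u_frame k_r12
      slot_rbp := by
        rw [w_mem]
        u_frame k_rbp
      slot_rbx := by
        rw [w_mem]
        u_frame k_rbx
      slot_ra := by
        rw [w_mem]
        u_frame k_ra
      inv := hinvB
      ok := hokB
      rem := by
        rw [hremF]
        exact hbody.rem
      same := by
        rw [w_mem]
        u_same
      code := ProgX.Base.conv_code_in w_eq
      abi := by
        refine ProgX.Base.abiInv_of ?_ ?_
        · rw [w_flags']
          simp only [X86.User.df_setStatus]
          exact w_df_10664c
        · rw [w_mxcsr]
          exact hmx
    }
    -- … and the results: GIF_OK, one byte moved from the buffer to the caller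
    refine ReachVia.done ?_
    exact {
      frame := hframe1
      res := by
        left
        rw [w_kept.get .rbp rfl, c_rbp]
        exact hrbp
      ok1 := by
        intro _
        have hb : rd s_106661.mem (F.pv + 88) 1 = b0 % 256 ^ 1 := by
          rw [w_mem]
          exact rd_writeLE_same _ (e.reg .rsi) 1 b0 (F.pv + 88) hrsi (by decide)
        rw [hb, hremF]
        have hadv' := hadv hz
        omega
    }
  · -- 0x10659d FROM 0x106636: a short read, `gif.Error = D_GIF_ERR_READ_FAILED` stored, ebp = 0
    -- the two stores since `v`: the check call's return address (stack), then `gif.Error`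
    obtain ⟨hinvA, hokA, hremA⟩ := store_stack hbody.inv hbody.ok ⟨hcur.1, hcur.2.1⟩ (e.reg .rsp - 48) 8 1074729
      (by u_omega) (by u_omega)
    obtain ⟨hinvB, hokB, hremB⟩ := store_gif hinvA hokA ⟨hcur.1, hcur.2.1⟩ hbase (e.reg .rdi + 96) 4 102
      (Or.inr (Or.inr (by u_omega)))
    rw [← w_mem] at hinvB hokB hremB
    have hremF : rem R s_106636.mem = rem R v.mem := hremB.trans hremA
    -- THE EXIT ASSERTION: `Frame` at 0x10659d …
    have hframe1 : DGifBufferedInput.Frame Gif.L.DGifBufferedInput.at_10659d H rest frames F R u₀ e ret s_106636 := {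
      entry := hbody.entry
      pre := hbody.pre
      next_above := hbody.next_above
      rip := w_rip
      rsp := w_rsp
      r15 := (w_kept.get .r15 rfl).trans hbody.r15
      slot_r14 := by
        rw [w_mem]
        u_frame k_r14
      slot_r13 := by
        rw [w_mem]
        u_frame k_r13
      slot_r12 := by
        rw [w_mem]
        u_frame k_r12
      slot_rbp := by
        rw [w_mem]
        u_frame k_rbp
      slot_rbx := by
        rw [w_mem]
        u_frame k_rbx
      slot_ra := by
        rw [w_mem]
        u_frame k_ra
      inv := hinvB
      ok := hokB
      rem := by
        rw [hremF]
        exact hbody.rem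
      same := by
        rw [w_mem]
        u_same
      code := ProgX.Base.conv_code_in w_eq
      abi := by
        refine ProgX.Base.abiInv_of ?_ ?_
        · rw [w_flags]
          exact w_df_106624
        · rw [w_mxcsr]
          exact hmx
    }
    -- … and the results: GIF_ERROR
    refine ReachVia.done ?_
    exact {
      frame := hframe1
      res := by
        right
        rw [w_rbp]
        decide
      ok1 := by
        intro h1
        rw [w_rbp] at h1
        exact absurd h1 (by decide)
    }

end Gif.Spec.DGifBufferedInput_3
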